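-- pv_equiv track=rewrite | github.com/YevhenBrusak/Crypto | homophonic_cypher.py | homophonic_decrypt
-- ===== SOURCE A (Python) =====
-- homophonic_table = {
--     'А': ['11', '12', '13'],
--     'Б': ['21', '22'],
--     'В': ['31', '32', '33'],
--     'Г': ['41', '42'],
--     'Д': ['51', '52', '53'],
--     'Е': ['61', '62'],
--     'Є': ['71'],
--     'Ж': ['81'],
--     'З': ['91', '92'],
--     'И': ['101', '102'],
--     'І': ['111', '112'],
--     'Ї': ['121'],
--     'Й': ['131'],
--     'К': ['141', '142'],
--     'Л': ['151', '152', '153'],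
--     'М': ['161', '162'],
--     'Н': ['171', '172', '173'],
--     'О': ['181', '182', '183', '184'],
--     'П': ['191', '192'],
--     'Р': ['201', '202', '203'],
--     'С': ['211', '212', '213'],
--     'Т': ['221', '222', '223'],
--     'У': ['231', '232'],
--     'Ф': ['241'],
--     'Х': ['251'],
--     'Ц': ['261'],
--     'Ч': ['271'],
--     'Ш': ['281'],
--     'Щ': ['291'],
--     'Ь': ['301'],
--     'Ю': ['311'],
--     'Я': ['321']
-- }
--
-- def homophonic_decrypt(encrypted_text):
--     decrypted_text = []
--     encrypted_list = encrypted_text.split()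
--
--     # Перевертаємо таблицю для пошуку за значенням
--     reverse_table = {hom: letter for letter, homophones in homophonic_table.items() for hom in homophones}
--
--     for code in encrypted_list:
--         if code in reverse_table:
--             decrypted_text.append(reverse_table[code])
--         else:
--             decrypted_text.append(code)
--
--     return ''.join(decrypted_text)
-- ===== SOURCE B (Python) =====
-- # Arithmetic positional decode: no code table and no reverse index -- a valid code
-- # reads as row*10+col with row the 1-based alphabet position and col in 1..COUNTS[row-1].
-- ALPHABET = 'АБВГДЕЄЖЗИІЇЙКЛМНОПРСТУФХЦЧШЩЬЮЯ'
-- COUNTS = [3, 2, 3, 2, 3, 2, 1, 1, 2, 2, 2, 1, 1, 2, 3, 2, 3, 4, 2, 3, 3, 3, 2, 1, 1, 1, 1, 1, 1, 1, 1, 1]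
--
-- def _code_letter(tok):
--     """The letter a valid homophonic code decodes to, else None."""
--     if tok.isdigit() and tok[0] != '0':
--         if len(tok) == 2:
--             row, col = ord(tok[0]) - 48, ord(tok[1]) - 48
--         elif len(tok) == 3:
--             row, col = 10 * (ord(tok[0]) - 48) + (ord(tok[1]) - 48), ord(tok[2]) - 48
--         else:
--             return None
--         if 1 <= row <= 32 and 1 <= col <= COUNTS[row - 1]:
--             return ALPHABET[row - 1]
--     return None
--
-- def homophonic_decrypt(encrypted_text):
--     return ''.join(_code_letter(tok) or tok for tok in encrypted_text.split())
-- ===== Notes on version B (the rewrite author's own statement) =====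
-- stated objective: alternative
-- what changed: Replaces A's precomputed reverse-lookup dict over the homophone table by a table-free positional decode: each token is read as row*10+col digits, validated against a per-letter homophone count, and mapped straight to the alphabet string by index.
import Mathlib
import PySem

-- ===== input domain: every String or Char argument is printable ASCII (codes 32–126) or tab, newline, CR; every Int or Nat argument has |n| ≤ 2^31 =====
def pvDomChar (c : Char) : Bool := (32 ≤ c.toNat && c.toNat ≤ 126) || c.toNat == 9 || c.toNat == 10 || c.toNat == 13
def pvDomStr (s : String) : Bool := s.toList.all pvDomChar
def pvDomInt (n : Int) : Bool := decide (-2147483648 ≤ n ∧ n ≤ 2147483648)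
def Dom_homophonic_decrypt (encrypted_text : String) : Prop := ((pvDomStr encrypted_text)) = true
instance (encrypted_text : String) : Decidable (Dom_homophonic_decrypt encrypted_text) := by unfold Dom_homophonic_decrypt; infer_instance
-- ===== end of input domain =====

set_option maxRecDepth 40000

-- B replaces A's reverse-lookup dict by a positional arithmetic decode of each token
-- (row = alphabet position, col bounded by a per-letter homophone count): an alternative
-- algorithm with no code table at all, not claimed faster.

-- ===== PORT A =====
def homophonic_table : List (String × List String) :=
  [("А", ["11", "12", "13"]), ("Б", ["21", "22"]), ("В", ["31", "32", "33"]),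
   ("Г", ["41", "42"]), ("Д", ["51", "52", "53"]), ("Е", ["61", "62"]),
   ("Є", ["71"]), ("Ж", ["81"]), ("З", ["91", "92"]), ("И", ["101", "102"]),
   ("І", ["111", "112"]), ("Ї", ["121"]), ("Й", ["131"]), ("К", ["141", "142"]),
   ("Л", ["151", "152", "153"]), ("М", ["161", "162"]), ("Н", ["171", "172", "173"]),
   ("О", ["181", "182", "183", "184"]), ("П", ["191", "192"]), ("Р", ["201", "202", "203"]),
   ("С", ["211", "212", "213"]), ("Т", ["221", "222", "223"]), ("У", ["231", "232"]),
   ("Ф", ["241"]), ("Х", ["251"]), ("Ц", ["261"]), ("Ч", ["271"]), ("Ш", ["281"]),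
   ("Щ", ["291"]), ("Ь", ["301"]), ("Ю", ["311"]), ("Я", ["321"])]

-- reverse_table = {hom: letter for letter, homophones in homophonic_table.items() for hom in homophones}
def reverse_table : PySem.Dict String String :=
  homophonic_table.foldl
    (fun d p => p.2.foldl (fun d hom => d.insert hom p.1) d) PySem.Dict.empty

def homophonic_decrypt (encrypted_text : String) : String :=
  let encrypted_list := PySem.Str.split₀ encrypted_text
  let decrypted_text :=
    encrypted_list.foldl
      (fun acc code =>
        match reverse_table.get? code with   -- 'if code in reverse_table: …[code]'
        | some letter => acc ++ [letter]
        | none => acc ++ [code]) []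
  PySem.Str.join "" decrypted_text

-- ===== PORT B =====
def alphabetB : List Char := "АБВГДЕЄЖЗИІЇЙКЛМНОПРСТУФХЦЧШЩЬЮЯ".toList
def countsB : List Int := [3,2,3,2,3,2,1,1,2,2,2,1,1,2,3,2,3,4,2,3,3,3,2,1,1,1,1,1,1,1,1,1]

-- 'if 1 <= row <= 32 and 1 <= col <= COUNTS[row - 1]: return ALPHABET[row - 1]'
def checkRowCol (row col : Int) : Option Char :=
  if 1 ≤ row ∧ row ≤ 32 then
    match PySem.List.pyGet? countsB (row - 1) with
    | some cnt => if 1 ≤ col ∧ col ≤ cnt then PySem.List.pyGet? alphabetB (row - 1) else none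
    | none => none   -- unreachable: 1 ≤ row ≤ 32 keeps the index in range
  else none

-- _code_letter(tok): isdigit/leading-zero gate, then positional decode by length
def codeLetter? (cs : List Char) : Option Char :=
  if PySem.Chars.strIsdigit cs && (PySem.List.pyGet? cs 0 != some '0') then
    match cs with
    | [a, b] => checkRowCol ((a.toNat : Int) - 48) ((b.toNat : Int) - 48)
    | [a, b, c] => checkRowCol (10 * ((a.toNat : Int) - 48) + ((b.toNat : Int) - 48)) ((c.toNat : Int) - 48)
    | _ => none
  else none

-- '_code_letter(tok) or tok'
def tokB (tok : String) : String :=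
  match codeLetter? tok.toList with
  | some c => String.ofList [c]
  | none => tok

def homophonic_decrypt_alt (encrypted_text : String) : String :=
  PySem.Str.join "" ((PySem.Str.split₀ encrypted_text).map tokB)

-- ===== PRECONDITION & SPEC =====
def Spec_homophonic_decrypt (encrypted_text : String) (out : String) : Prop := out = homophonic_decrypt_alt encrypted_text
instance (encrypted_text : String) (out : String) : Decidable (Spec_homophonic_decrypt encrypted_text out) := by unfold Spec_homophonic_decrypt; infer_instance

-- ===== CLAIM (what is proved, stated in full; the proofs are below) =====
def Claim_equal_homophonic_decrypt : Prop := ∀ (encrypted_text : String), Dom_homophonic_decrypt encrypted_text → Spec_homophonic_decrypt encrypted_text (homophonic_decrypt encrypted_text)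

-- ===== LEMMAS AND PROOFS =====

-- A's per-token value, named for the proof.
def tokA (code : String) : String :=
  match reverse_table.get? code with
  | some letter => letter
  | none => code

-- all codes occurring in the table, in table order
def allCodes : List String := homophonic_table.flatMap (·.2)

def digitsL : List Char := ['0','1','2','3','4','5','6','7','8','9']
def nzdigitsL : List Char := ['1','2','3','4','5','6','7','8','9']

-- every char list codeLetter?'s gate can accept (2 or 3 digits, no leading zero)
-- 3-char tokens starting beyond '3' give row > 32, handled arithmetically, so are left out
def candidates : List (List Char) :=
  (nzdigitsL.flatMap fun a => digitsL.map fun b => [a, b]) ++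
  (['1','2','3'].flatMap fun a => digitsL.flatMap fun b => digitsL.map fun c => [a, b, c])

lemma reverse_table_keys : reverse_table.keys = allCodes := by decide

lemma codes_case : ∀ code ∈ allCodes, tokA code = tokB code := by decide

lemma enum : ∀ cs ∈ candidates, cs ∈ allCodes.map String.toList ∨ codeLetter? cs = none := by decide

lemma digit_toNat (c : Char) (h : PySem.Chars.isdigit c = true) :
    48 ≤ c.toNat ∧ c.toNat ≤ 57 := by
  simpa [PySem.Chars.isdigit, Char.le_def, UInt32.le_iff_toNat_le] using h

lemma digit_mem (c : Char) (h : PySem.Chars.isdigit c = true) : c ∈ digitsL := by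
  obtain ⟨h1', h2'⟩ := digit_toNat c h
  have hc := Char.ofNat_toNat c
  interval_cases h3 : c.toNat <;> (rw [← hc]; decide)

lemma nzdigit_mem (c : Char) (h : PySem.Chars.isdigit c = true) (h0 : c ≠ '0') : c ∈ nzdigitsL := by
  have := digit_mem c h
  simp [digitsL, nzdigitsL] at *
  tauto

lemma checkRowCol_none (row col : Int) (h : ¬(1 ≤ row ∧ row ≤ 32)) :
    checkRowCol row col = none := by
  unfold checkRowCol; rw [if_neg h]

lemma codeLetter?_shape (cs : List Char) (c : Char) (h : codeLetter? cs = some c) :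
    cs ∈ candidates := by
  unfold codeLetter? at h
  by_cases hg : (PySem.Chars.strIsdigit cs && (PySem.List.pyGet? cs 0 != some '0')) = true
  · rw [if_pos hg] at h
    simp only [Bool.and_eq_true, bne_iff_ne, ne_eq] at hg
    obtain ⟨hd, h0⟩ := hg
    simp [PySem.Chars.strIsdigit] at hd
    match cs, h with
    | [a, b], h =>
      have ha : a ∈ nzdigitsL := by
        apply nzdigit_mem a (by simp_all)
        intro hae; apply h0; simp [PySem.List.pyGet?, PySem.List.pyIdx?, hae]
      have hb : b ∈ digitsL := digit_mem b (hd.2 b (by simp))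
      simp only [candidates, List.mem_append, List.mem_flatMap, List.mem_map]
      exact Or.inl ⟨a, ha, b, hb, rfl⟩
    | [a, b, c'], h =>
      have hda : PySem.Chars.isdigit a = true := by simp_all
      have hdb : PySem.Chars.isdigit b = true := hd.2 b (by simp)
      by_cases hcut : a.toNat ≤ 51
      · have ha : a ∈ nzdigitsL := by
          apply nzdigit_mem a hda
          intro hae; apply h0; simp [PySem.List.pyGet?, PySem.List.pyIdx?, hae]
        have ha3 : a ∈ ['1', '2', '3'] := by
          simp only [nzdigitsL, List.mem_cons, List.not_mem_nil, or_false] at ha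
          rcases ha with rfl | rfl | rfl | rfl | rfl | rfl | rfl | rfl | rfl <;>
            first | decide | (exact absurd hcut (by decide))
        have hb : b ∈ digitsL := digit_mem b hdb
        have hc3 : c' ∈ digitsL := digit_mem c' (hd.2 c' (by simp))
        simp only [candidates, List.mem_append, List.mem_flatMap, List.mem_map]
        exact Or.inr ⟨a, ha3, b, hb, c', hc3, rfl⟩
      · -- first digit ≥ '4': row ≥ 40 > 32, so the check rejects and h is impossible
        exfalso
        obtain ⟨hb1, -⟩ := digit_toNat b hdb
        have h' : checkRowCol (10 * ((a.toNat : Int) - 48) + ((b.toNat : Int) - 48))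
            ((c'.toNat : Int) - 48) = some c := h
        rw [checkRowCol_none _ _ (by omega)] at h'
        exact absurd h' (by simp)
  · rw [if_neg hg] at h; exact absurd h (by simp)

lemma tok_eq (tok : String) : tokA tok = tokB tok := by
  by_cases h : tok ∈ allCodes
  · exact codes_case tok h
  · have hB : codeLetter? tok.toList = none := by
      cases hc : codeLetter? tok.toList with
      | none => rfl
      | some c =>
        rcases enum _ (codeLetter?_shape _ _ hc) with hm | hn
        · exfalso
          simp only [List.mem_map] at hm
          obtain ⟨s, hs, hsl⟩ := hm
          exact h (String.toList_inj.mp hsl ▸ hs)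
        · rw [hn] at hc; exact absurd hc (by simp)
    rw [show tokB tok = tok by unfold tokB; rw [hB]]
    have hA : reverse_table.get? tok = none := by
      rw [PySem.Dict.get?_eq_none_iff_not_mem_keys, reverse_table_keys]
      exact h
    unfold tokA; rw [hA]

lemma foldl_tokA (l : List String) :
    l.foldl
      (fun acc code =>
        match reverse_table.get? code with
        | some letter => acc ++ [letter]
        | none => acc ++ [code]) []
      = l.map tokA := by
  have hbody : (fun (acc : List String) (code : String) =>
      match reverse_table.get? code with
      | some letter => acc ++ [letter]
      | none => acc ++ [code]) = fun acc code => acc ++ [tokA code] := by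
    funext acc code
    unfold tokA
    cases reverse_table.get? code <;> rfl
  rw [hbody, PySem.List.foldl_append_singleton_eq_map]
  simp

-- ===== VERDICT (by name: the statement is the Claim_ definition above) =====
theorem homophonic_decrypt_spec : Claim_equal_homophonic_decrypt := by
  intro encrypted_text _
  unfold Spec_homophonic_decrypt homophonic_decrypt homophonic_decrypt_alt
  simp only [foldl_tokA]
  congr 1
  exact List.map_congr_left (fun code _ => tok_eq code)
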